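-- pv_equiv track=rewrite | github.com/haiyLiu/Multi-source-Knowledge-Enhancement-Framework | small_experiments/long_tail/long_tail.py | split_entity_frequency_bins
-- ===== SOURCE A (Python) =====
-- def split_entity_frequency_bins(entity_frequency, max_split=100):
--     result = {}
--     max_value = max(entity_frequency.values())
--     for key, value in entity_frequency.items():
--         if value < max_split:  # 以max_split为界限
--             # 按10为区间划分
--             range_start = (value // 10) * 10
--             range_end = range_start + 10
--             range_key = f"{range_start}-{range_end}"    # 生成区间键，格式如 "0-10"
--             if range_key not in result:
--                 result[range_key] = {}
--             result[range_key][key] = value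
--         else:
--             range_key = f"{max_split}-{max_value}"
--             if range_key not in result:
--                 result[range_key] = {}
--             result[range_key][key] = value
--     return result
-- ===== SOURCE B (Python) =====
-- def split_entity_frequency_bins(entity_frequency, max_split=100):
--     max_value = max(entity_frequency.values())
--
--     def label(v):
--         lo = v // 10 * 10
--         start, end = (lo, lo + 10) if v < max_split else (max_split, max_value)
--         return f"{start}-{end}"
--
--     def group(items):
--         if not items:
--             return {}
--         lab = label(items[0][1])
--         same = {k: v for k, v in items if label(v) == lab}
--         rest = [(k, v) for k, v in items if label(v) != lab]
--         out = {lab: same}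
--         out.update(group(rest))
--         return out
--
--     return group(list(entity_frequency.items()))
-- ===== Notes on version B (the rewrite author's own statement) =====
-- stated objective: alternative
-- what changed: Replaces A's single-pass mutation of a dict-of-dicts with a recursive extract-group scheme: take the first remaining item's bin label, split the list into that bin and the rest by partition, emit the bin, and recurse on the rest.
import Mathlib
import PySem

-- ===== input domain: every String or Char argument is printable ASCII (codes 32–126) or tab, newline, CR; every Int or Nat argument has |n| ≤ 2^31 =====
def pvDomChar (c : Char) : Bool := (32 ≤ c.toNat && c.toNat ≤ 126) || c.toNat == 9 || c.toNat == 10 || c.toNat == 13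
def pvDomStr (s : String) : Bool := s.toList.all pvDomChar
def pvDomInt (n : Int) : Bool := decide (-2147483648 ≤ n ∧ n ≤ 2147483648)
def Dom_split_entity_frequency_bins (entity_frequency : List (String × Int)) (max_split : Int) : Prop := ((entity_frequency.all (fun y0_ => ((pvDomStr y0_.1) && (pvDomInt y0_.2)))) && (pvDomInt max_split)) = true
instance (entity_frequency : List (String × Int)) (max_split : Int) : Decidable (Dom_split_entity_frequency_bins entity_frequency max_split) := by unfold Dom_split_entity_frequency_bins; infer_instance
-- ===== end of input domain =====

-- B replaces A's single-pass dict-of-dicts mutation with a recursive extract-group scheme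
-- (take the first remaining item's bin label, partition the list, emit that bin, recurse on the rest).
-- The equivalence is about the RETURN value; neither program mutates its argument.

-- ===== PORT A =====
-- A's f-string range key, both branches of A's if (str(...) + "-" + str(...) is exact for f"{a}-{b}" on ints)
def pvRangeKeyA (max_split max_value value : Int) : String :=
  if value < max_split then
    let range_start := PySem.Int.floordiv value 10 * 10
    PySem.Int.toStr range_start ++ "-" ++ PySem.Int.toStr (range_start + 10)
  else
    PySem.Int.toStr max_split ++ "-" ++ PySem.Int.toStr max_value

def split_entity_frequency_bins (entity_frequency : List (String × Int)) (max_split : Int) : List (String × List (String × Int)) :=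
  let d := PySem.Dict.ofList entity_frequency  -- the Python dict the assoc list denotes
  match PySem.List.max? d.values id with       -- max(entity_frequency.values()); none = ValueError, excluded by Pre_
  | none => []
  | some max_value =>
      -- for key, value: if range_key not in result: result[range_key] = {}; result[range_key][key] = value
      -- (= result[range_key] = result.get(range_key, {}) updated with key: value, i.e. Dict.modify)
      ((d.items.foldl
        (fun (result : PySem.Dict String (PySem.Dict String Int)) kv =>
          result.modify (pvRangeKeyA max_split max_value kv.2) PySem.Dict.empty
            (fun inner => inner.insert kv.1 kv.2))
        PySem.Dict.empty).items).map (fun p => (p.1, p.2.items))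

-- ===== PORT B =====
-- B's label(v): choose the (start, end) pair, then format it once
def pvLabelB (max_split max_value v : Int) : String :=
  let lo := PySem.Int.floordiv v 10 * 10
  let se : Int × Int := if v < max_split then (lo, lo + 10) else (max_split, max_value)
  PySem.Int.toStr se.1 ++ "-" ++ PySem.Int.toStr se.2

-- B's recursive group(items): the inner dict comprehension over the distinct-keyed items is the
-- filtered pair list; out.update(group(rest)) appends, since rest holds no lab-labelled item.
def pvGroupB (max_split max_value : Int) (items : List (String × Int)) :
    List (String × List (String × Int)) :=
  match items with
  | [] => []
  | kv :: t =>
      let lab := pvLabelB max_split max_value kv.2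
      let same := (kv :: t).filter (fun x => pvLabelB max_split max_value x.2 == lab)
      let rest := (kv :: t).filter (fun x => pvLabelB max_split max_value x.2 != lab)
      (lab, same) :: pvGroupB max_split max_value rest
  termination_by items.length
  decreasing_by
    simp only [List.filter_cons, bne_self_eq_false, if_neg, Bool.false_eq_true,
      not_false_eq_true, List.length_cons]
    exact Nat.lt_succ_of_le (List.length_filter_le _ _)

def split_entity_frequency_bins_alt (entity_frequency : List (String × Int)) (max_split : Int) : List (String × List (String × Int)) :=
  let d := PySem.Dict.ofList entity_frequency
  match PySem.List.max? d.values id with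
  | none => []
  | some max_value => pvGroupB max_split max_value d.items

-- ===== PRECONDITION & SPEC =====
-- Pre_ excludes only the empty dict, on which A's max(entity_frequency.values()) raises ValueError.
def Pre_split_entity_frequency_bins (entity_frequency : List (String × Int)) (max_split : Int) : Prop :=
  entity_frequency ≠ []
instance (entity_frequency : List (String × Int)) (max_split : Int) : Decidable (Pre_split_entity_frequency_bins entity_frequency max_split) := by unfold Pre_split_entity_frequency_bins; infer_instance

def pvWitness_split_entity_frequency_bins : (List (String × Int)) × Int := ([("a", 3), ("b", 250)], 100)

def Spec_split_entity_frequency_bins (entity_frequency : List (String × Int)) (max_split : Int) (out : List (String × List (String × Int))) : Prop := out = split_entity_frequency_bins_alt entity_frequency max_split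
instance (entity_frequency : List (String × Int)) (max_split : Int) (out : List (String × List (String × Int))) : Decidable (Spec_split_entity_frequency_bins entity_frequency max_split out) := by unfold Spec_split_entity_frequency_bins; infer_instance

-- ===== CLAIM =====
def Claim_equal_split_entity_frequency_bins : Prop := ∀ (entity_frequency : List (String × Int)) (max_split : Int), Dom_split_entity_frequency_bins entity_frequency max_split → Pre_split_entity_frequency_bins entity_frequency max_split → Spec_split_entity_frequency_bins entity_frequency max_split (split_entity_frequency_bins entity_frequency max_split)

-- ===== LEMMAS AND PROOFS =====

-- The two label helpers compute the same string.
theorem pvLabelB_eq : pvLabelB = pvRangeKeyA := by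
  funext ms mv v
  unfold pvLabelB pvRangeKeyA
  split <;> rfl

-- The bin A's loop has built under label `lab` is exactly the items with that label, inserted in order.
theorem pv_getD_fold (L : String × Int → String) (l : List (String × Int))
    (d : PySem.Dict String (PySem.Dict String Int)) (lab : String) :
    (l.foldl (fun r kv => r.modify (L kv) PySem.Dict.empty (fun inner => inner.insert kv.1 kv.2)) d).getD lab PySem.Dict.empty
      = (l.filter (fun kv => L kv == lab)).foldl (fun inner kv => inner.insert kv.1 kv.2) (d.getD lab PySem.Dict.empty) := by
  induction l generalizing d with
  | nil => rfl
  | cons kv l ih =>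
      simp only [List.foldl_cons, List.filter_cons]
      rw [ih, PySem.Dict.getD_modify]
      by_cases h : lab = L kv
      · subst h; simp
      · simp [h, Ne.symm h]

-- An insert-loop over pairs with distinct fresh keys reproduces the pair list as items.
theorem pv_inner_items (l : List (String × Int)) (h : (l.map Prod.fst).Nodup) :
    (l.foldl (fun inner kv => inner.insert kv.1 kv.2) (PySem.Dict.empty : PySem.Dict String Int)).items = l := by
  have := PySem.Dict.items_foldl_insert_fresh l Prod.fst Prod.snd PySem.Dict.empty
    (fun a _ => PySem.Dict.contains_empty _) h
  simpa using this

-- A's grouping = first-occurrence labels, each with its filtered slice.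
theorem pv_group_A (L : String × Int → String) (l : List (String × Int)) (h : (l.map Prod.fst).Nodup) :
    ((l.foldl (fun r kv => r.modify (L kv) PySem.Dict.empty (fun inner => inner.insert kv.1 kv.2)) PySem.Dict.empty).items).map (fun p => (p.1, p.2.items))
      = (PySem.List.dedup (l.map L)).map (fun lab => (lab, l.filter (fun kv => L kv == lab))) := by
  have hnodup : ((l.foldl (fun r kv => r.modify (L kv) PySem.Dict.empty (fun inner => inner.insert kv.1 kv.2)) PySem.Dict.empty)).keys.Nodup := by
    refine PySem.Dict.nodup_keys_foldl_modify_key l L PySem.Dict.empty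
      (fun _ kv inner => inner.insert kv.1 kv.2) PySem.Dict.empty ?_
    simp
  have hkeys : ((l.foldl (fun r kv => r.modify (L kv) PySem.Dict.empty (fun inner => inner.insert kv.1 kv.2)) PySem.Dict.empty)).keys = PySem.Set.ofList (l.map L) := by
    have := PySem.Dict.keys_foldl_modify_key l L PySem.Dict.empty
      (fun _ kv inner => inner.insert kv.1 kv.2) PySem.Dict.empty
    simpa [PySem.Set.update_empty] using this
  rw [PySem.Dict.items_eq_map_keys _ hnodup PySem.Dict.empty, hkeys, List.map_map]
  refine List.map_congr_left (fun lab _ => ?_)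
  simp only [Function.comp_def]
  rw [pv_getD_fold, PySem.Dict.getD_empty]
  exact congrArg (Prod.mk lab) (pv_inner_items _ (((List.filter_sublist).map Prod.fst).nodup h))

-- Set.add, with the added element already present downstream, skips filtered-out duplicates.
theorem pv_foldl_add_filter {α : Type} [BEq α] [LawfulBEq α] (a : α) :
    ∀ (xs acc : List α), a ∈ acc →
      xs.foldl PySem.Set.add acc = (xs.filter (fun x => x != a)).foldl PySem.Set.add acc := by
  intro xs
  induction xs with
  | nil => intro _ _; rfl
  | cons x xs ih =>
      intro acc ha
      by_cases hx : x = a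
      · subst hx
        have : PySem.Set.add acc x = acc := by
          simp [PySem.Set.add, PySem.Set.contains, ha]
        simp only [List.filter_cons, bne_self_eq_false, List.foldl_cons, this]
        exact ih acc ha
      · have hmem : a ∈ PySem.Set.add acc x := by
          unfold PySem.Set.add; split <;> simp [ha]
        simp only [List.filter_cons, bne_iff_ne, ne_eq, hx, not_false_eq_true, if_pos,
          List.foldl_cons]
        exact ih _ hmem

-- A fresh head element of the accumulator stays in front: add appends at the end.
theorem pv_foldl_add_peel {α : Type} [BEq α] [LawfulBEq α] (b : α) :
    ∀ (ys acc : List α), b ∉ ys →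
      ys.foldl PySem.Set.add (b :: acc) = b :: ys.foldl PySem.Set.add acc := by
  intro ys
  induction ys with
  | nil => intro _ _; rfl
  | cons y ys ih =>
      intro acc hb
      have hyb : y ≠ b := fun h => hb (h ▸ List.mem_cons_self)
      have hstep : PySem.Set.add (b :: acc) y = b :: PySem.Set.add acc y := by
        unfold PySem.Set.add
        have hc : (b :: acc).contains y = acc.contains y := by simp [hyb]
        simp only [PySem.Set.contains, hc]
        split <;> simp
      simp only [List.foldl_cons, hstep]
      exact ih _ (fun h => hb (List.mem_cons_of_mem _ h))

-- dedup peels its head: first label, then dedup of the rest with that label removed.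
theorem pv_dedup_cons {α : Type} [BEq α] [LawfulBEq α] (a : α) (xs : List α) :
    PySem.List.dedup (a :: xs) = a :: PySem.List.dedup (xs.filter (fun x => x != a)) := by
  unfold PySem.List.dedup PySem.Set.ofList
  have h1 : (a :: xs).foldl PySem.Set.add PySem.Set.empty
      = xs.foldl PySem.Set.add (a :: ([] : List α)) := by
    simp [PySem.Set.add, PySem.Set.empty, PySem.Set.contains]
  rw [h1, pv_foldl_add_filter a xs _ (by simp),
    pv_foldl_add_peel a _ [] (by simp)]
  rfl

-- One unfolding of B's recursion.
theorem pvGroupB_cons (ms mv : Int) (kv : String × Int) (t : List (String × Int)) :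
    pvGroupB ms mv (kv :: t)
      = (pvLabelB ms mv kv.2,
         (kv :: t).filter (fun x => pvLabelB ms mv x.2 == pvLabelB ms mv kv.2)) ::
        pvGroupB ms mv (t.filter (fun x => pvLabelB ms mv x.2 != pvLabelB ms mv kv.2)) := by
  rw [pvGroupB]
  simp

-- B's recursion = first-occurrence labels, each with its filtered slice (same normal form as A's),
-- by strong induction via a length bound.
theorem pv_group_B_aux (ms mv : Int) :
    ∀ (n : Nat) (l : List (String × Int)), l.length ≤ n →
    pvGroupB ms mv l
      = (PySem.List.dedup (l.map (fun kv => pvLabelB ms mv kv.2))).map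
          (fun lab => (lab, l.filter (fun kv => pvLabelB ms mv kv.2 == lab))) := by
  intro n
  induction n with
  | zero =>
      intro l hl
      have : l = [] := List.eq_nil_of_length_eq_zero (Nat.le_zero.mp hl)
      subst this
      simp [pvGroupB, PySem.List.dedup, PySem.Set.ofList, PySem.Set.empty]
  | succ n ih =>
      intro l hl
      cases l with
      | nil => simp [pvGroupB, PySem.List.dedup, PySem.Set.ofList, PySem.Set.empty]
      | cons kv t =>
          have hrest : (t.filter (fun x => pvLabelB ms mv x.2 != pvLabelB ms mv kv.2)).length ≤ n :=
            Nat.le_of_lt_succ (Nat.lt_of_le_of_lt (List.length_filter_le _ _)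
              (Nat.lt_of_succ_le (by simpa using hl)))
          rw [pvGroupB_cons, ih _ hrest, List.map_cons, pv_dedup_cons, List.filter_map,
            List.map_cons]
          congr 1
          refine List.map_congr_left (fun lab hlab => ?_)
          have hne : lab ≠ pvLabelB ms mv kv.2 := by
            have hmem := (PySem.List.mem_dedup _ _).mp hlab
            rcases List.mem_map.mp hmem with ⟨x, hx, hxl⟩
            have hxn : pvLabelB ms mv x.2 ≠ pvLabelB ms mv kv.2 := by
              simpa using (List.mem_filter.mp hx).2
            exact hxl ▸ hxn
          congr 1
          rw [List.filter_cons]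
          have h0 : (pvLabelB ms mv kv.2 == lab) = false := by
            simp [Ne.symm hne]
          rw [if_neg (by simp [h0])]
          rw [List.filter_filter]
          refine (List.filter_congr (fun x _ => ?_)).symm
          by_cases hx : pvLabelB ms mv x.2 = lab
          · simp [hx, hne]
          · simp [hx]

theorem pv_group_B (ms mv : Int) (l : List (String × Int)) :
    pvGroupB ms mv l
      = (PySem.List.dedup (l.map (fun kv => pvLabelB ms mv kv.2))).map
          (fun lab => (lab, l.filter (fun kv => pvLabelB ms mv kv.2 == lab))) :=
  pv_group_B_aux ms mv l.length l (Nat.le_refl _)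

-- ===== VERDICT =====
theorem split_entity_frequency_bins_spec : Claim_equal_split_entity_frequency_bins := by
  intro ef ms _ _
  unfold Spec_split_entity_frequency_bins split_entity_frequency_bins split_entity_frequency_bins_alt
  simp only []
  cases hmax : PySem.List.max? (PySem.Dict.ofList ef).values id with
  | none => rfl
  | some mv =>
      have hn : ((PySem.Dict.ofList ef).items.map Prod.fst).Nodup := PySem.Dict.nodup_keys_ofList ef
      dsimp only
      rw [pv_group_B]
      simpa [pvLabelB_eq] using
        pv_group_A (fun kv => pvRangeKeyA ms mv kv.2) (PySem.Dict.ofList ef).items hn
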